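-- pv_equiv track=rewrite | github.com/ephemient/aoc2019 | src/aoc2019/day24.py | part2
-- ===== SOURCE A (Python) =====
-- from collections import Counter
--
-- def parse(lines):
--     return frozenset((x, y) for y in range(-2, 3) for x in range(-2, 3)
--                      if lines[y + 2][x + 2] == '#')
--
-- def evolve(bugs, neighbors):
--     counter = Counter()
--     for bug in bugs:
--         counter.update(neighbors(*bug))
--     return frozenset(bug for bug, count in counter.items()
--                      if count == 1 or count == 2 and bug not in bugs)
--
-- def part2(lines, n=200):
--     '''
--     >>> part2("....# #..#. #..## ..#.. #....".split(), 10)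
--     99
--     '''
--     def neighbors(x, y, z):
--         neighbors = []
--         if x > -2 and (x, y) != (1, 0): neighbors.append((x - 1, y, z))
--         if y > -2 and (x, y) != (0, 1): neighbors.append((x, y - 1, z))
--         if x < 2 and (x, y) != (-1, 0): neighbors.append((x + 1, y, z))
--         if y < 2 and (x, y) != (0, -1): neighbors.append((x, y + 1, z))
--         if (abs(x), y) == (1, 0):
--             neighbors.extend((2 * x, y, z - 1) for y in range(-2, 3))
--         if (x, abs(y)) == (0, 1):
--             neighbors.extend((x, 2 * y, z - 1) for x in range(-2, 3))
--         if abs(x) == 2: neighbors.append((x // 2, 0, z + 1))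
--         if abs(y) == 2: neighbors.append((0, y // 2, z + 1))
--         return neighbors
--
--     bugs = frozenset((x, y, 0) for x, y in parse(lines))
--     for _ in range(n):
--         bugs = evolve(bugs, neighbors)
--     return len(bugs)
-- ===== SOURCE B (Python) =====
-- def part2(lines, n=200):
--     def neighbors(x, y, z):
--         cardinal = [(a, b, z)
--                     for a, b in ((x - 1, y), (x, y - 1), (x + 1, y), (x, y + 1))
--                     if -2 <= a <= 2 and -2 <= b <= 2 and (a, b) != (0, 0)]
--         if (abs(x), y) == (1, 0):
--             inner = [(2 * x, b, z - 1) for b in range(-2, 3)]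
--         elif (x, abs(y)) == (0, 1):
--             inner = [(a, 2 * y, z - 1) for a in range(-2, 3)]
--         else:
--             inner = []
--         outer = ([(x // 2, 0, z + 1)] if abs(x) == 2 else []) \
--               + ([(0, y // 2, z + 1)] if abs(y) == 2 else [])
--         return cardinal + inner + outer
--
--     bugs = []
--     for y in range(5):
--         row = lines[y]
--         for x in range(5):
--             if row[x] == '#':
--                 bugs.append((x - 2, y - 2, 0))
--     for _ in range(n):
--         # gather pass: for each candidate cell, count its live neighbors directly
--         candidates = list(dict.fromkeys(c for b in bugs for c in neighbors(*b)))
--         nxt = []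
--         for c in candidates:
--             cnt = sum(1 for b in bugs if c in neighbors(*b))
--             if cnt == 1 or cnt == 2 and c not in bugs:
--                 nxt.append(c)
--         bugs = nxt
--     return len(bugs)
-- ===== Notes on version B (the rewrite author's own statement) =====
-- stated objective: alternative
-- what changed: The Counter-based scatter evolve is replaced by a gather pass (deduplicated candidate list, then per-candidate direct count of bugs listing it as a neighbor), the neighbor function is rebuilt as one filter over the four candidate moves plus edge extensions, and parsing is an accumulator loop over 0-based indices instead of a frozenset comprehension.
import Mathlib
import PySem

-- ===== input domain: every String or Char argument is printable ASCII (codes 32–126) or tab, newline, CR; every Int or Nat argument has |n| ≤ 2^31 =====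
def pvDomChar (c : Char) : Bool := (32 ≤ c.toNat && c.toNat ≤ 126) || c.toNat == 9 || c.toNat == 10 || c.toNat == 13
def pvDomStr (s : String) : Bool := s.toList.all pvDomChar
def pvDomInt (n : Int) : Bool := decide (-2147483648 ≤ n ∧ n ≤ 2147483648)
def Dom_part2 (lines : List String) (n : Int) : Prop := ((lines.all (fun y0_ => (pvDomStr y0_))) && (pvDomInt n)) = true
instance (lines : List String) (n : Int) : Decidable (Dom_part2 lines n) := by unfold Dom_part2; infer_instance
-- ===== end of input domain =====

-- B replaces A's Counter-scatter evolve by a gather pass (per candidate, count live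
-- neighbors directly), its own filter-based neighbor function and an accumulator parse
-- loop (objective: alternative decomposition, similar cost on these grid sizes).

-- ===== PORT A =====
-- A's nested 'neighbors' function, step for step
def nbrs (x y z : Int) : List (Int × Int × Int) :=
  (if x > -2 ∧ ¬(x = 1 ∧ y = 0) then [(x - 1, y, z)] else []) ++
  (if y > -2 ∧ ¬(x = 0 ∧ y = 1) then [(x, y - 1, z)] else []) ++
  (if x < 2 ∧ ¬(x = -1 ∧ y = 0) then [(x + 1, y, z)] else []) ++
  (if y < 2 ∧ ¬(x = 0 ∧ y = -1) then [(x, y + 1, z)] else []) ++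
  (if |x| = 1 ∧ y = 0 then (PySem.List.pyRange (-2) 3 1).map (fun y' => (2 * x, y', z - 1)) else []) ++
  (if x = 0 ∧ |y| = 1 then (PySem.List.pyRange (-2) 3 1).map (fun x' => (x', 2 * y, z - 1)) else []) ++
  (if |x| = 2 then [(PySem.Int.floordiv x 2, 0, z + 1)] else []) ++
  (if |y| = 2 then [(0, PySem.Int.floordiv y 2, z + 1)] else [])

-- A's module-level 'parse'
def parseG (lines : List String) : List (Int × Int) :=
  PySem.Set.ofList ((PySem.List.pyRange (-2) 3 1).flatMap (fun y =>
    ((PySem.List.pyRange (-2) 3 1).filter (fun x =>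
      PySem.Str.pyGet? (PySem.List.pyGetD lines (y + 2) "") (x + 2) == some '#')).map (fun x => (x, y))))

-- A's evolve: scatter every bug's neighbors into a Counter, then filter its items
def evolveA (bugs : List (Int × Int × Int))
    (neighbors : Int → Int → Int → List (Int × Int × Int)) : List (Int × Int × Int) :=
  let counter : PySem.Dict (Int × Int × Int) Int :=
    bugs.foldl (fun d b => (neighbors b.1 b.2.1 b.2.2).foldl (fun d c => d.modify c 0 (· + 1)) d)
      PySem.Dict.empty
  PySem.Set.ofList (counter.items.filterMap (fun p =>
    if p.2 == 1 || (p.2 == 2 && !(PySem.Set.contains bugs p.1)) then some p.1 else none))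

def part2 (lines : List String) (n : Int) : Int :=
  let bugs0 : PySem.Set (Int × Int × Int) :=
    PySem.Set.ofList ((parseG lines).map (fun p => (p.1, p.2, (0 : Int))))
  let final := (PySem.List.pyRange 0 n 1).foldl (fun bugs _ => evolveA bugs nbrs) bugs0
  PySem.Set.len final

-- ===== PORT B =====
-- B's neighbor function: one filter over the four candidate same-level moves,
-- then the inner-edge extension (at most one of the two can apply), then the outer cells
def nbrsB (x y z : Int) : List (Int × Int × Int) :=
  let cardinal := ([(x - 1, y), (x, y - 1), (x + 1, y), (x, y + 1)].filter
      (fun p => decide ((-2 ≤ p.1 ∧ p.1 ≤ 2 ∧ -2 ≤ p.2 ∧ p.2 ≤ 2) ∧ ¬(p.1 = 0 ∧ p.2 = 0)))).map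
      (fun p => (p.1, p.2, z))
  let inner :=
    if |x| = 1 ∧ y = 0 then (PySem.List.pyRange (-2) 3 1).map (fun b => (2 * x, b, z - 1))
    else if x = 0 ∧ |y| = 1 then (PySem.List.pyRange (-2) 3 1).map (fun a => (a, 2 * y, z - 1))
    else []
  let outer := (if |x| = 2 then [(PySem.Int.floordiv x 2, 0, z + 1)] else []) ++
               (if |y| = 2 then [(0, PySem.Int.floordiv y 2, z + 1)] else [])
  cardinal ++ inner ++ outer

def part2_alt (lines : List String) (n : Int) : Int :=
  let bugs0 := (PySem.List.pyRange 0 5 1).foldl (fun acc y =>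
      let row := PySem.List.pyGetD lines y ""
      (PySem.List.pyRange 0 5 1).foldl (fun acc x =>
        if PySem.Str.pyGet? row x == some '#' then acc ++ [(x - 2, y - 2, (0 : Int))] else acc) acc)
    ([] : List (Int × Int × Int))
  let final := (PySem.List.pyRange 0 n 1).foldl (fun bugs _ =>
    let candidates := PySem.List.dedup (bugs.flatMap (fun b => nbrsB b.1 b.2.1 b.2.2))
    candidates.filter (fun c =>
      let cnt : Int := ((bugs.filter (fun b => (nbrsB b.1 b.2.1 b.2.2).contains c)).length : Int)
      cnt == 1 || (cnt == 2 && !(bugs.contains c)))) bugs0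
  (final.length : Int)

-- ===== PRECONDITION & SPEC =====
-- true iff the list has at least five elements
def hasFiveOrMore {α : Type} (xs : List α) : Bool :=
  match xs with
  | _ :: _ :: _ :: _ :: _ :: _ => true
  | _ => false

-- Pre_ excludes exactly the inputs where Python A raises IndexError in parse:
-- fewer than five lines, or one of the first five lines shorter than five characters.
def Pre_part2 (lines : List String) (n : Int) : Prop :=
  (match lines with
   | a :: b :: c :: d :: e :: _ =>
     hasFiveOrMore a.toList && hasFiveOrMore b.toList && hasFiveOrMore c.toList &&
     hasFiveOrMore d.toList && hasFiveOrMore e.toList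
   | _ => false) = true
instance (lines : List String) (n : Int) : Decidable (Pre_part2 lines n) := by
  unfold Pre_part2; infer_instance
def pvWitness_part2 : List String × Int :=
  (["##.#.#", "#..##.", ".##..#", "#.#.##", "..###.", "##..#."], 6)
def Spec_part2 (lines : List String) (n : Int) (out : Int) : Prop := out = part2_alt lines n
instance (lines : List String) (n : Int) (out : Int) : Decidable (Spec_part2 lines n out) := by
  unfold Spec_part2; infer_instance

-- ===== CLAIM (what is proved, stated in full; the proofs are below) =====
def Claim_equal_part2 : Prop := ∀ (lines : List String) (n : Int),
  Dom_part2 lines n → Pre_part2 lines n → Spec_part2 lines n (part2 lines n)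

-- ===== LEMMAS AND PROOFS =====

-- cells reachable in the recursive grid: coordinates within the 5×5 box
def inBox (c : Int × Int × Int) : Prop :=
  -2 ≤ c.1 ∧ c.1 ≤ 2 ∧ -2 ≤ c.2.1 ∧ c.2.1 ≤ 2

lemma pyRange_m2_3 : PySem.List.pyRange (-2) 3 1 = [-2, -1, 0, 1, 2] := by decide

-- B's neighbor function agrees with A's on every reachable cell
lemma nbrsB_eq_nbrs {x y : Int} (z : Int) (hx : -2 ≤ x ∧ x ≤ 2) (hy : -2 ≤ y ∧ y ≤ 2) :
    nbrsB x y z = nbrs x y z := by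
  obtain ⟨hx1, hx2⟩ := hx; obtain ⟨hy1, hy2⟩ := hy
  interval_cases x <;> interval_cases y <;> rfl

lemma nbrs_nodup {x y : Int} (z : Int) (hx : -2 ≤ x ∧ x ≤ 2) (hy : -2 ≤ y ∧ y ≤ 2) :
    (nbrs x y z).Nodup := by
  obtain ⟨hx1, hx2⟩ := hx; obtain ⟨hy1, hy2⟩ := hy
  interval_cases x <;> interval_cases y <;>
    simp [nbrs, pyRange_m2_3, PySem.Int.floordiv, Prod.ext_iff] <;> omega

lemma nbrs_inBox {x y : Int} (z : Int) (hx : -2 ≤ x ∧ x ≤ 2) (hy : -2 ≤ y ∧ y ≤ 2) :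
    ∀ c ∈ nbrs x y z, inBox c := by
  obtain ⟨hx1, hx2⟩ := hx; obtain ⟨hy1, hy2⟩ := hy
  interval_cases x <;> interval_cases y <;>
    simp [nbrs, pyRange_m2_3, PySem.Int.floordiv, inBox]

lemma count_flatMap_eq_filter_length (bugs : List (Int × Int × Int)) (c : Int × Int × Int)
    (hnd : ∀ b ∈ bugs, (nbrs b.1 b.2.1 b.2.2).Nodup) :
    (bugs.flatMap (fun b => nbrs b.1 b.2.1 b.2.2)).count c
      = (bugs.filter (fun b => (nbrs b.1 b.2.1 b.2.2).contains c)).length := by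
  induction bugs with
  | nil => rfl
  | cons b bs ih =>
    have hnd' : ∀ b' ∈ bs, (nbrs b'.1 b'.2.1 b'.2.2).Nodup :=
      fun b' hb' => hnd b' (List.mem_cons_of_mem _ hb')
    by_cases h : c ∈ nbrs b.1 b.2.1 b.2.2
    · have h1 : (nbrs b.1 b.2.1 b.2.2).count c = 1 :=
        List.count_eq_one_of_mem (hnd b List.mem_cons_self) h
      simp [List.flatMap_cons, List.count_append, h1, h, List.contains_eq_mem, ih hnd']
      omega
    · have h0 : (nbrs b.1 b.2.1 b.2.2).count c = 0 := List.count_eq_zero.mpr h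
      simp [List.flatMap_cons, List.count_append, h0, h, List.contains_eq_mem, ih hnd']

lemma filterMap_if_eq_filter {α : Type} (p : α → Bool) (l : List α) :
    l.filterMap (fun a => if p a then some a else none) = l.filter p := by
  induction l with
  | nil => rfl
  | cons a t ih => by_cases h : p a <;> simp [h, ih]

-- B's step function (written out for the lemmas below)
def stepB (bugs : List (Int × Int × Int)) : List (Int × Int × Int) :=
  (PySem.List.dedup (bugs.flatMap (fun b => nbrsB b.1 b.2.1 b.2.2))).filter (fun c =>
    let cnt : Int := ((bugs.filter (fun b => (nbrsB b.1 b.2.1 b.2.2).contains c)).length : Int)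
    cnt == 1 || (cnt == 2 && !(bugs.contains c)))

lemma evolveA_eq_stepB (bugs : List (Int × Int × Int)) (hP : ∀ b ∈ bugs, inBox b) :
    evolveA bugs nbrs = stepB bugs := by
  have hnB : ∀ b ∈ bugs, nbrsB b.1 b.2.1 b.2.2 = nbrs b.1 b.2.1 b.2.2 := fun b hb =>
    nbrsB_eq_nbrs b.2.2 ⟨(hP b hb).1, (hP b hb).2.1⟩ ⟨(hP b hb).2.2.1, (hP b hb).2.2.2⟩
  have hflat : bugs.flatMap (fun b => nbrsB b.1 b.2.1 b.2.2)
      = bugs.flatMap (fun b => nbrs b.1 b.2.1 b.2.2) := by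
    induction bugs with
    | nil => rfl
    | cons b bs ih =>
      simp only [List.flatMap_cons]
      rw [hnB b List.mem_cons_self,
        ih (fun b' hb' => hP b' (List.mem_cons_of_mem _ hb'))
           (fun b' hb' => hnB b' (List.mem_cons_of_mem _ hb'))]
  have hfilt : ∀ c, bugs.filter (fun b => (nbrsB b.1 b.2.1 b.2.2).contains c)
      = bugs.filter (fun b => (nbrs b.1 b.2.1 b.2.2).contains c) := by
    intro c
    exact List.filter_congr (fun b hb => by rw [hnB b hb])
  simp only [evolveA]
  have h1 : bugs.foldl
      (fun d b => (nbrs b.1 b.2.1 b.2.2).foldl (fun d c => d.modify c 0 (· + 1)) d)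
      PySem.Dict.empty
      = PySem.Dict.counter (bugs.flatMap (fun b => nbrs b.1 b.2.1 b.2.2)) := by
    rw [PySem.Dict.counter_eq_foldl, List.foldl_flatMap]
  rw [h1, PySem.Dict.items_counter, List.filterMap_map]
  have h2 : ((fun p => if p.2 == 1 || (p.2 == 2 && !(PySem.Set.contains bugs p.1))
        then some p.1 else none) ∘
      (fun k => ((k : Int × Int × Int),
        ((bugs.flatMap (fun b => nbrs b.1 b.2.1 b.2.2)).count k : Int))))
      = fun k => if ((bugs.flatMap (fun b => nbrs b.1 b.2.1 b.2.2)).count k : Int) == 1 ||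
          (((bugs.flatMap (fun b => nbrs b.1 b.2.1 b.2.2)).count k : Int) == 2 &&
            !(PySem.Set.contains bugs k)) then some k else none := rfl
  rw [h2, filterMap_if_eq_filter]
  unfold stepB
  rw [hflat, PySem.List.dedup_eq_ofList]
  refine Eq.trans
    (PySem.Set.ofList_eq_self_of_nodup _ (List.Nodup.filter _ (PySem.Set.nodup_ofList _))) ?_
  refine List.filter_congr ?_
  intro k _
  have hcnt := count_flatMap_eq_filter_length bugs k
    (fun b hb => nbrs_nodup b.2.2 ⟨(hP b hb).1, (hP b hb).2.1⟩ ⟨(hP b hb).2.2.1, (hP b hb).2.2.2⟩)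
  simp only [hfilt k, hcnt, PySem.Set.contains]

lemma evolve_preserves (bugs : List (Int × Int × Int)) (hP : ∀ b ∈ bugs, inBox b) :
    ∀ c ∈ evolveA bugs nbrs, inBox c := by
  intro c hc
  rw [evolveA_eq_stepB bugs hP] at hc
  unfold stepB at hc
  rw [PySem.List.dedup_eq_ofList] at hc
  rw [List.mem_filter] at hc
  obtain ⟨hc1, -⟩ := hc
  rw [PySem.Set.mem_ofList, List.mem_flatMap] at hc1
  obtain ⟨b, hb, hcb⟩ := hc1
  rw [nbrsB_eq_nbrs b.2.2 ⟨(hP b hb).1, (hP b hb).2.1⟩ ⟨(hP b hb).2.2.1, (hP b hb).2.2.2⟩] at hcb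
  exact nbrs_inBox b.2.2 ⟨(hP b hb).1, (hP b hb).2.1⟩ ⟨(hP b hb).2.2.1, (hP b hb).2.2.2⟩ c hcb

lemma foldl_congr_inv {α β : Type} (P : α → Prop) (f g : α → β → α)
    (hpres : ∀ a b, P a → P (f a b)) (hfg : ∀ a b, P a → f a b = g a b) :
    ∀ (l : List β) (a : α), P a → l.foldl f a = l.foldl g a := by
  intro l
  induction l with
  | nil => intro a _; rfl
  | cons x xs ih =>
    intro a ha
    simp only [List.foldl_cons]
    rw [← hfg a x ha]
    exact ih _ (hpres a x ha)

lemma bugs0_inBox (lines : List String) :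
    ∀ c ∈ (PySem.Set.ofList ((parseG lines).map (fun p => (p.1, p.2, (0 : Int)))) :
        PySem.Set (Int × Int × Int)), inBox c := by
  intro c hc
  rw [PySem.Set.mem_ofList, List.mem_map] at hc
  obtain ⟨p, hp, rfl⟩ := hc
  unfold parseG at hp
  rw [PySem.Set.mem_ofList, List.mem_flatMap] at hp
  obtain ⟨y, hy, hp⟩ := hp
  rw [List.mem_map] at hp
  obtain ⟨x, hx, rfl⟩ := hp
  rw [List.mem_filter] at hx
  rw [PySem.List.mem_pyRange_one] at hy
  have hx' := hx.1
  rw [PySem.List.mem_pyRange_one] at hx'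
  refine ⟨?_, ?_, ?_, ?_⟩ <;> dsimp only <;> omega

-- the two initial bug lists are the same list
lemma row_eq (row : String) (w : Int) :
    (([0, 1, 2, 3, 4].filter (fun x => PySem.Str.pyGet? row x == some '#')).map
        (fun x => (x - 2, w, (0 : Int))))
    = (([-2, -1, 0, 1, 2].filter (fun x : Int => PySem.Str.pyGet? row (x + 2) == some '#')).map
        (fun x => (x, w, (0 : Int)))) := by
  cases h0 : PySem.List.pyGet? row.toList 0 == some '#' <;>
  cases h1 : PySem.List.pyGet? row.toList 1 == some '#' <;>
  cases h2 : PySem.List.pyGet? row.toList 2 == some '#' <;>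
  cases h3 : PySem.List.pyGet? row.toList 3 == some '#' <;>
  cases h4 : PySem.List.pyGet? row.toList 4 == some '#' <;>
  norm_num [List.filter, h0, h1, h2, h3, h4]

lemma nodup_parse_arg (lines : List String) :
    ((PySem.List.pyRange (-2) 3 1).flatMap (fun y =>
      ((PySem.List.pyRange (-2) 3 1).filter (fun x =>
        PySem.Str.pyGet? (PySem.List.pyGetD lines (y + 2) "") (x + 2) == some '#')).map
        (fun x => (x, y)))).Nodup := by
  rw [List.nodup_flatMap]
  constructor
  · intro y _
    exact List.Nodup.map (fun a b h => by simpa using congrArg Prod.fst h)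
      (List.Nodup.filter _ (by decide))
  · refine List.Pairwise.imp ?_ (show (PySem.List.pyRange (-2) 3 1).Pairwise (· ≠ ·) by decide)
    intro a b hab p hpa hpb
    rw [List.mem_map] at hpa hpb
    obtain ⟨xa, -, rfl⟩ := hpa
    obtain ⟨xb, -, h⟩ := hpb
    exact hab (congrArg Prod.snd h).symm

lemma bugs0_eq (lines : List String) :
    (PySem.List.pyRange 0 5 1).foldl (fun acc y =>
      let row := PySem.List.pyGetD lines y ""
      (PySem.List.pyRange 0 5 1).foldl (fun acc x =>
        if PySem.Str.pyGet? row x == some '#' then acc ++ [(x - 2, y - 2, (0 : Int))] else acc) acc)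
      ([] : List (Int × Int × Int))
    = PySem.Set.ofList ((parseG lines).map (fun p => (p.1, p.2, (0 : Int)))) := by
  have h5 : PySem.List.pyRange 0 5 1 = [0, 1, 2, 3, 4] := by decide
  have hr : PySem.List.pyRange (-2) 3 1 = [-2, -1, 0, 1, 2] := by decide
  -- right side: strip the two ofLists
  have hL := nodup_parse_arg lines
  have hinj : Function.Injective (fun p : Int × Int => (p.1, p.2, (0 : Int))) := by
    intro a b h
    cases a; cases b
    simpa [Prod.ext_iff] using h
  rw [parseG, PySem.Set.ofList_eq_self_of_nodup _ hL,
    PySem.Set.ofList_eq_self_of_nodup _ (List.Nodup.map hinj hL)]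
  -- left side: inner loops are filter+map
  have hinner : ∀ (acc : List (Int × Int × Int)) (y : Int),
      (PySem.List.pyRange 0 5 1).foldl (fun acc x =>
        if PySem.Str.pyGet? (PySem.List.pyGetD lines y "") x == some '#'
        then acc ++ [(x - 2, y - 2, (0 : Int))] else acc) acc
      = acc ++ (([0, 1, 2, 3, 4].filter (fun x =>
          PySem.Str.pyGet? (PySem.List.pyGetD lines y "") x == some '#')).map
          (fun x => (x - 2, y - 2, (0 : Int)))) := by
    intro acc y
    rw [h5]
    exact PySem.List.foldl_append_if _ _ _ _
  simp only [hinner]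
  rw [h5, hr]
  simp only [List.foldl_cons, List.foldl_nil, List.flatMap_cons, List.flatMap_nil,
    List.map_append, List.map_map]
  simp only [row_eq]
  norm_num [Function.comp_def]

-- ===== VERDICT (by name: the statement is the Claim_ definition above) =====
theorem part2_spec : Claim_equal_part2 := by
  intro lines n _ _
  unfold Spec_part2 part2 part2_alt
  simp only [bugs0_eq lines]
  have hfold := foldl_congr_inv (fun s => ∀ c ∈ s, inBox c)
      (fun bugs _ => evolveA bugs nbrs) (fun bugs _ => stepB bugs)
      (fun a _ ha => evolve_preserves a ha)
      (fun a _ ha => evolveA_eq_stepB a ha)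
      (PySem.List.pyRange 0 n 1) _ (bugs0_inBox lines)
  rw [hfold]
  rfl
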